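-- pv_equiv track=rewrite | github.com/shumailab489/Meta-Hacker-Cup-2025 | A2 Problem/A2.py | can_with_h
-- ===== SOURCE A (Python) =====
-- def can_with_h(heights, h):
--     """Return True if with ladder height h all platforms are reachable from ground."""
--     n = len(heights)
--     if n == 0:
--         return True
--     # Walk through platforms, splitting where adjacent difference > h
--     i = 0
--     while i < n:
--         # start of component at i
--         comp_min = heights[i]
--         j = i
--         while j + 1 < n and abs(heights[j+1] - heights[j]) <= h:
--             j += 1
--             if heights[j] < comp_min:
--                 comp_min = heights[j]
--         # component is [i..j], check if it has a platform with height <= h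
--         if comp_min > h:
--             return False
--         # continue after the component
--         i = j + 1
--     return True
-- ===== SOURCE B (Python) =====
-- def can_with_h(heights, h):
--     """Return True if with ladder height h all platforms are reachable from ground."""
--     def sweep(hs):
--         # reach[i]: platform i is reachable moving rightwards along hs
--         reach = []
--         ok = False
--         prev = 0
--         for cur in hs:
--             ok = cur <= h or (ok and abs(cur - prev) <= h)
--             reach.append(ok)
--             prev = cur
--         return reach
--     fwd = sweep(heights)
--     bwd = sweep(heights[::-1])[::-1]
--     return all(f or b for f, b in zip(fwd, bwd))
-- ===== Notes on version B (the rewrite author's own statement) =====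
-- stated objective: alternative
-- what changed: Replaces A's segment walk with a running minimum by the standard reachability propagation: two directional sweeps (left-to-right and right-to-left) computing per-platform reachability flags, then all(fwd[i] or bwd[i]).
import Mathlib
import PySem

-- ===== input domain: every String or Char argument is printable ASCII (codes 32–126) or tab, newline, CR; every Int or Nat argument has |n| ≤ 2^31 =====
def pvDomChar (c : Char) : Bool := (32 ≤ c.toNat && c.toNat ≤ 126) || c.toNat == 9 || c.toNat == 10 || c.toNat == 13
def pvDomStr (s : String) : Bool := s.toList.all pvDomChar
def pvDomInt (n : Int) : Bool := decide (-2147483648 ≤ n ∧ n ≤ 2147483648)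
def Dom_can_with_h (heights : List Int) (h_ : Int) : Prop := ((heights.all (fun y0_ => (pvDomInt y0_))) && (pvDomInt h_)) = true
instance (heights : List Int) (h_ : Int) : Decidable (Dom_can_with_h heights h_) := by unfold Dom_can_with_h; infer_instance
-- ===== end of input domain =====

-- B replaces A's segment walk with running minimum by reachability propagation: two
-- directional sweeps computing per-platform reachability flags, then all(fwd or bwd)
-- (objective: alternative algorithm, same O(n) cost).


-- ===== PORT A =====
-- A's inner while loop: starting from the platform `cur` with running minimum `m`,
-- extend the component while the next adjacent difference is ≤ h, updating the
-- minimum exactly as A does; returns (comp_min, platforms after the component).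
def pvInnerA (h_ : Int) (cur m : Int) : List Int → Int × List Int
  | [] => (m, [])
  | y :: ys => if |y - cur| ≤ h_ then pvInnerA h_ y (if y < m then y else m) ys else (m, y :: ys)

-- needed by outer loop's termination (the remainder is no longer than the input)
theorem pvInnerA_len (h_ : Int) : ∀ (xs : List Int) (cur m : Int), (pvInnerA h_ cur m xs).2.length ≤ xs.length := by
  intro xs
  induction xs with
  | nil => intro cur m; simp [pvInnerA]
  | cons y ys ih =>
    intro cur m
    simp only [pvInnerA]
    split
    · exact Nat.le_trans (ih y _) (Nat.le_succ _)
    · simp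

-- A's outer while loop: `x` is heights[i], `rest` the platforms after it.
def pvOuterA (h_ : Int) (x : Int) (rest : List Int) : Bool :=
  let p := pvInnerA h_ x x rest
  if p.1 > h_ then false
  else
    match hp : p.2 with
    | [] => true
    | z :: zs => pvOuterA h_ z zs
termination_by rest.length
decreasing_by
  have := pvInnerA_len h_ rest x x
  rw [hp] at this
  simp at this
  omega

def can_with_h (heights : List Int) (h_ : Int) : Bool :=
  match heights with
  | [] => true
  | x :: rest => pvOuterA h_ x rest

-- ===== PORT B =====
-- Source B's `sweep`: one pass over hs carrying (reach list, ok, prev), where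
-- ok = cur <= h or (ok and abs(cur - prev) <= h) at each platform.
def pvSweepB (h_ : Int) (hs : List Int) : List Bool :=
  (hs.foldl (fun (st : List Bool × Bool × Int) cur =>
      let ok := decide (cur ≤ h_) || (st.2.1 && decide (|cur - st.2.2| ≤ h_))
      (st.1 ++ [ok], ok, cur)) ([], false, 0)).1

def can_with_h_alt (heights : List Int) (h_ : Int) : Bool :=
  let fwd := pvSweepB h_ heights
  let bwd := (pvSweepB h_ heights.reverse).reverse
  (List.zip fwd bwd).all (fun fb => fb.1 || fb.2)

-- ===== PRECONDITION & SPEC =====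
def Spec_can_with_h (heights : List Int) (h_ : Int) (out : Bool) : Prop := out = can_with_h_alt heights h_
instance (heights : List Int) (h_ : Int) (out : Bool) : Decidable (Spec_can_with_h heights h_ out) := by unfold Spec_can_with_h; infer_instance

-- ===== CLAIM (what is proved, stated in full; the proofs are below) =====
def Claim_equal_can_with_h : Prop := ∀ (heights : List Int) (h_ : Int), Dom_can_with_h heights h_ → Spec_can_with_h heights h_ (can_with_h heights h_)

-- ===== LEMMAS AND PROOFS =====

-- ---------- common reference: the maximal components (cut where the gap exceeds h) ----------
def pvComps (h_ : Int) : List Int → List (List Int)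
  | [] => []
  | [x] => [[x]]
  | x :: y :: t =>
    match pvComps h_ (y :: t) with
    | [] => [[x]]
    | c :: cs => if |y - x| ≤ h_ then (x :: c) :: cs else [x] :: c :: cs

theorem pvComps_shape (h_ : Int) : ∀ (t : List Int) (x : Int), ∃ c cs, pvComps h_ (x :: t) = (x :: c) :: cs := by
  intro t
  induction t with
  | nil => intro x; exact ⟨[], [], rfl⟩
  | cons y ys ih =>
    intro x
    obtain ⟨c, cs, hc⟩ := ih y
    by_cases hg : |y - x| ≤ h_
    · exact ⟨y :: c, cs, by simp [pvComps, hc, hg]⟩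
    · exact ⟨[], (y :: c) :: cs, by simp [pvComps, hc, hg]⟩

theorem pvComps_mem_ne_nil (h_ : Int) : ∀ (l : List Int) (c : List Int), c ∈ pvComps h_ l → c ≠ [] := by
  intro l
  induction l with
  | nil => intro c hc; simp [pvComps] at hc
  | cons x t ih =>
    intro c hc
    cases t with
    | nil => simp [pvComps] at hc; simp [hc]
    | cons y ys =>
      obtain ⟨c', cs', hc'⟩ := pvComps_shape h_ ys y
      by_cases hg : |y - x| ≤ h_
      · simp [pvComps, hc', hg] at hc
        rcases hc with h1 | h2
        · simp [h1]
        · exact ih c (by rw [hc']; exact List.mem_cons_of_mem _ h2)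
      · simp [pvComps, hc', hg] at hc
        rcases hc with h1 | h2 | h3
        · simp [h1]
        · simp [h2]
        · exact ih c (by rw [hc']; exact List.mem_cons_of_mem _ h3)

-- appending one element to the last component
def pvPushLast (x : Int) : List (List Int) → List (List Int)
  | [] => [[x]]
  | [c] => [c ++ [x]]
  | c :: c' :: cs => c :: pvPushLast x (c' :: cs)

theorem pvPushLast_append (x : Int) : ∀ (L : List (List Int)) (c : List Int), pvPushLast x (L ++ [c]) = L ++ [c ++ [x]] := by
  intro L
  induction L with
  | nil => intro c; rfl
  | cons a L' ih =>
    intro c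
    cases L' with
    | nil => rfl
    | cons b L'' =>
      show a :: pvPushLast x ((b :: L'') ++ [c]) = a :: ((b :: L'') ++ [c ++ [x]])
      exact congrArg _ (ih c)

theorem pvComps_snoc (h_ : Int) : ∀ (ys : List Int) (z x : Int),
    pvComps h_ ((z :: ys) ++ [x]) =
      if |x - (z :: ys).getLastD 0| ≤ h_ then pvPushLast x (pvComps h_ (z :: ys))
      else pvComps h_ (z :: ys) ++ [[x]] := by
  intro ys
  induction ys with
  | nil =>
    intro z x
    simp only [List.cons_append, List.nil_append, List.getLastD]
    by_cases hg : |x - z| ≤ h_ <;> simp [pvComps, hg, pvPushLast]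
  | cons w ws ih =>
    intro z x
    have hlast : (z :: w :: ws).getLastD 0 = (w :: ws).getLastD 0 := by
      simp [List.getLastD]
    obtain ⟨c, cs, hc⟩ := pvComps_shape h_ ws w
    have step : pvComps h_ ((z :: w :: ws) ++ [x]) =
        match pvComps h_ ((w :: ws) ++ [x]) with
        | [] => [[z]]
        | c :: cs => if |w - z| ≤ h_ then (z :: c) :: cs else [z] :: c :: cs := by
      rfl
    have hcomps : pvComps h_ (z :: w :: ws) = if |w - z| ≤ h_ then (z :: w :: c) :: cs else [z] :: (w :: c) :: cs := by
      simp [pvComps, hc]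
    rw [step, ih w x, hlast, hc, hcomps]
    by_cases hgl : |x - (w :: ws).getLastD 0| ≤ h_ <;>
      by_cases hg : |w - z| ≤ h_ <;>
        cases cs <;>
          (simp only [List.getLastD_eq_getLast?] at hgl; simp [pvPushLast, hg, hgl])

theorem getLastD_reverse (l : List Int) : l.reverse.getLastD 0 = l.headD 0 := by
  cases l with
  | nil => rfl
  | cons x t => simp

theorem pvComps_reverse (h_ : Int) : ∀ (l : List Int), pvComps h_ l.reverse = ((pvComps h_ l).map List.reverse).reverse := by
  intro l
  induction l with
  | nil => rfl
  | cons x t ih =>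
    cases t with
    | nil => rfl
    | cons y ys =>
      have hrev : (x :: y :: ys).reverse = (y :: ys).reverse ++ [x] := by simp
      obtain ⟨c, cs, hc⟩ := pvComps_shape h_ ys y
      rw [hrev]
      have hne : (y :: ys).reverse ≠ [] := by simp
      obtain ⟨z, zs, hz⟩ : ∃ z zs, (y :: ys).reverse = z :: zs := by
        cases hyr : (y :: ys).reverse with
        | nil => exact absurd hyr hne
        | cons a b => exact ⟨a, b, rfl⟩
      rw [hz, pvComps_snoc h_ zs z x, ← hz]
      rw [getLastD_reverse]
      have hhead : (y :: ys).headD 0 = y := rfl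
      rw [hhead, ih]
      have habs : |x - y| ≤ h_ ↔ |y - x| ≤ h_ := by constructor <;> intro hh <;> [rw [abs_sub_comm]; rw [abs_sub_comm]] <;> exact hh
      by_cases hg : |y - x| ≤ h_
      · rw [if_pos (habs.mpr hg)]
        rw [hc]
        simp only [pvComps, hc, hg, if_true]
        rw [show ((List.map List.reverse ((y :: c) :: cs)).reverse : List (List Int))
              = (List.map List.reverse cs).reverse ++ [(y :: c).reverse] by simp]
        rw [pvPushLast_append]
        simp
      · rw [if_neg (fun hh => hg (habs.mp hh))]
        rw [hc]
        simp only [pvComps, hc, hg, ite_false]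
        simp

-- ---------- B side ----------
-- recursive form of Source B's sweep
def pvSweepR (h_ : Int) (ok : Bool) (prev : Int) : List Int → List Bool
  | [] => []
  | y :: ys =>
    let r := decide (y ≤ h_) || (ok && decide (|y - prev| ≤ h_))
    r :: pvSweepR h_ r y ys

theorem pvSweepB_fold (h_ : Int) : ∀ (hs : List Int) (acc : List Bool) (ok : Bool) (prev : Int),
    (hs.foldl (fun (st : List Bool × Bool × Int) cur =>
      let okn := decide (cur ≤ h_) || (st.2.1 && decide (|cur - st.2.2| ≤ h_))
      (st.1 ++ [okn], okn, cur)) (acc, ok, prev)).1 = acc ++ pvSweepR h_ ok prev hs := by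
  intro hs
  induction hs with
  | nil => intro acc ok prev; simp [pvSweepR]
  | cons y ys ih =>
    intro acc ok prev
    simp only [List.foldl_cons, pvSweepR]
    rw [ih]
    simp

theorem pvSweepB_eq (h_ : Int) (hs : List Int) : pvSweepB h_ hs = pvSweepR h_ false 0 hs := by
  unfold pvSweepB
  rw [pvSweepB_fold]
  simp

-- boolean prefix-or scan over one component (all internal gaps ≤ h there)
def pvBscan (h_ : Int) (b : Bool) : List Int → List Bool
  | [] => []
  | y :: ys =>
    let r := b || decide (y ≤ h_)
    r :: pvBscan h_ r ys

theorem pvBscan_length (h_ : Int) : ∀ (l : List Int) (b : Bool), (pvBscan h_ b l).length = l.length := by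
  intro l
  induction l with
  | nil => intro b; rfl
  | cons y ys ih => intro b; simp [pvBscan, ih]

theorem pvBscan_or (h_ : Int) : ∀ (l : List Int) (a b : Bool), pvBscan h_ (a || b) l = (pvBscan h_ b l).map (a || ·) := by
  intro l
  induction l with
  | nil => intro a b; rfl
  | cons y ys ih =>
    intro a b
    simp only [pvBscan, List.map_cons, Bool.or_assoc]
    rw [ih]

theorem pvBscan_snoc (h_ : Int) : ∀ (ys : List Int) (b : Bool) (x : Int),
    pvBscan h_ b (ys ++ [x]) = pvBscan h_ b ys ++ [b || ys.any (fun y => decide (y ≤ h_)) || decide (x ≤ h_)] := by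
  intro ys
  induction ys with
  | nil => intro b x; simp [pvBscan]
  | cons y t ih =>
    intro b x
    simp only [List.cons_append, pvBscan, ih]
    simp [Bool.or_assoc]

-- the backward sweep restricted to one component
def pvRevBscan (h_ : Int) (c : List Int) : List Bool := (pvBscan h_ false c.reverse).reverse

theorem pvRevBscan_length (h_ : Int) (c : List Int) : (pvRevBscan h_ c).length = c.length := by
  simp [pvRevBscan, pvBscan_length]

theorem pvRevBscan_cons (h_ : Int) (x : Int) (t : List Int) :
    pvRevBscan h_ (x :: t) = (t.any (fun y => decide (y ≤ h_)) || decide (x ≤ h_)) :: pvRevBscan h_ t := by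
  unfold pvRevBscan
  rw [show (x :: t).reverse = t.reverse ++ [x] by simp]
  rw [pvBscan_snoc]
  simp

-- pointwise: within one component, fwd[i] or bwd[i] is constantly "some element ≤ h"
theorem pvZip_comp (h_ : Int) : ∀ (c : List Int),
    List.zipWith (fun a b => a || b) (pvBscan h_ false c) (pvRevBscan h_ c) =
      List.replicate c.length (c.any (fun y => decide (y ≤ h_))) := by
  intro c
  induction c with
  | nil => rfl
  | cons x t ih =>
    rw [pvRevBscan_cons]
    simp only [pvBscan, Bool.false_or, List.zipWith_cons_cons]
    have h1 : pvBscan h_ (decide (x ≤ h_)) t = (pvBscan h_ false t).map (decide (x ≤ h_) || ·) := by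
      rw [← pvBscan_or]
      simp
    rw [h1]
    have h2 : List.zipWith (fun a b => a || b) ((pvBscan h_ false t).map (decide (x ≤ h_) || ·)) (pvRevBscan h_ t)
        = (List.zipWith (fun a b => a || b) (pvBscan h_ false t) (pvRevBscan h_ t)).map (decide (x ≤ h_) || ·) := by
      rw [List.zipWith_map_left, List.map_zipWith]
      simp [Bool.or_assoc]
    rw [h2, ih]
    simp only [List.map_replicate, List.length_cons, List.replicate_succ, List.any_cons]
    congr 1
    cases hx : decide (x ≤ h_) <;> cases ht : t.any (fun y => decide (y ≤ h_)) <;> simp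

-- the all-of-zip used at top level, and its splitting along equal-length blocks
def pvZall (u v : List Bool) : Bool := (List.zip u v).all (fun fb => fb.1 || fb.2)

theorem pvZall_append (u1 v1 u2 v2 : List Bool) (hlen : u1.length = v1.length) :
    pvZall (u1 ++ u2) (v1 ++ v2) = (pvZall u1 v1 && pvZall u2 v2) := by
  unfold pvZall
  rw [List.zip_append hlen]
  simp

theorem pvZall_zipWith (u v : List Bool) : pvZall u v = (List.zipWith (fun a b => a || b) u v).all id := by
  induction u generalizing v with
  | nil => cases v <;> rfl
  | cons a u' ih =>
    cases v with
    | nil => rfl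
    | cons b v' =>
      have hih := ih v'
      simp only [pvZall] at hih ⊢
      simp only [List.zip_cons_cons, List.all_cons, List.zipWith_cons_cons, id_eq, hih]

-- sweep over the whole list = independent prefix-or scans per component
theorem pvSweepR_comps (h_ : Int) : ∀ (xs : List Int) (ok : Bool) (prev : Int),
    pvSweepR h_ ok prev xs =
      match pvComps h_ xs with
      | [] => []
      | c :: cs => pvBscan h_ (ok && decide (|xs.headD 0 - prev| ≤ h_)) c ++ (cs.map (pvBscan h_ false)).flatten := by
  intro xs
  induction xs with
  | nil => intro ok prev; rfl
  | cons x t ih =>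
    intro ok prev
    cases t with
    | nil =>
      simp only [pvComps, pvSweepR, pvBscan, List.map_nil, List.flatten_nil, List.append_nil, List.headD]
      rw [Bool.or_comm]
      exact rfl
    | cons y ys =>
      obtain ⟨c, cs, hc⟩ := pvComps_shape h_ ys y
      have ihy0 := ih (decide (x ≤ h_) || (ok && decide (|x - prev| ≤ h_))) x
      rw [hc] at ihy0
      have ihy : pvSweepR h_ (decide (x ≤ h_) || (ok && decide (|x - prev| ≤ h_))) x (y :: ys)
          = pvBscan h_ ((decide (x ≤ h_) || (ok && decide (|x - prev| ≤ h_))) && decide (|y - x| ≤ h_)) (y :: c)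
            ++ (cs.map (pvBscan h_ false)).flatten := ihy0
      have hor : (decide (x ≤ h_) || (ok && decide (|x - prev| ≤ h_)))
          = ((ok && decide (|x - prev| ≤ h_)) || decide (x ≤ h_)) := Bool.or_comm _ _
      by_cases hg : |y - x| ≤ h_
      · have hcomps : pvComps h_ (x :: y :: ys) = (x :: y :: c) :: cs := by
          show (match pvComps h_ (y :: ys) with
                | [] => [[x]]
                | c :: cs => if |y - x| ≤ h_ then (x :: c) :: cs else [x] :: c :: cs) = _
          rw [hc]; simp [hg]
        rw [hcomps]
        show (decide (x ≤ h_) || (ok && decide (|x - prev| ≤ h_)))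
            :: pvSweepR h_ (decide (x ≤ h_) || (ok && decide (|x - prev| ≤ h_))) x (y :: ys)
          = pvBscan h_ (ok && decide (|x - prev| ≤ h_)) (x :: y :: c) ++ (cs.map (pvBscan h_ false)).flatten
        rw [ihy]
        have hb : ((decide (x ≤ h_) || (ok && decide (|x - prev| ≤ h_))) && decide (|y - x| ≤ h_))
            = (decide (x ≤ h_) || (ok && decide (|x - prev| ≤ h_))) := by simp [hg]
        rw [hb, hor]
        rfl
      · have hcomps : pvComps h_ (x :: y :: ys) = [x] :: (y :: c) :: cs := by
          show (match pvComps h_ (y :: ys) with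
                | [] => [[x]]
                | c :: cs => if |y - x| ≤ h_ then (x :: c) :: cs else [x] :: c :: cs) = _
          rw [hc]; simp [hg]
        rw [hcomps]
        show (decide (x ≤ h_) || (ok && decide (|x - prev| ≤ h_)))
            :: pvSweepR h_ (decide (x ≤ h_) || (ok && decide (|x - prev| ≤ h_))) x (y :: ys)
          = pvBscan h_ (ok && decide (|x - prev| ≤ h_)) [x] ++ (((y :: c) :: cs).map (pvBscan h_ false)).flatten
        rw [ihy]
        have hb : ((decide (x ≤ h_) || (ok && decide (|x - prev| ≤ h_))) && decide (|y - x| ≤ h_)) = false := by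
          simp [hg]
        rw [hb, hor]
        rfl

-- assembly over the components (each component nonempty)
theorem pvZall_flatten (h_ : Int) : ∀ (L : List (List Int)), (∀ d ∈ L, d ≠ []) →
    pvZall ((L.map (pvBscan h_ false)).flatten) ((L.map (pvRevBscan h_)).flatten)
      = L.all (fun c => c.any (fun y => decide (y ≤ h_))) := by
  intro L
  induction L with
  | nil => intro _; simp [pvZall]
  | cons d ds ihd =>
    intro hne
    simp only [List.map_cons, List.flatten_cons, List.all_cons]
    rw [pvZall_append _ _ _ _ (by rw [pvBscan_length, pvRevBscan_length])]
    rw [ihd (fun e he => hne e (List.mem_cons_of_mem _ he))]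
    congr 1
    rw [pvZall_zipWith, pvZip_comp]
    have hd : d ≠ [] := hne d List.mem_cons_self
    cases d with
    | nil => exact absurd rfl hd
    | cons a t => cases hv : (a :: t).any (fun y => decide (y ≤ h_)) <;> simp [hv]

-- B's whole answer = every component has some element ≤ h
theorem pvAlt_comps (h_ : Int) (hs : List Int) :
    can_with_h_alt hs h_ = (pvComps h_ hs).all (fun c => c.any (fun y => decide (y ≤ h_))) := by
  unfold can_with_h_alt
  rw [pvSweepB_eq, pvSweepB_eq]
  have hfwd : pvSweepR h_ false 0 hs = ((pvComps h_ hs).map (pvBscan h_ false)).flatten := by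
    rw [pvSweepR_comps]
    cases hcomp : pvComps h_ hs with
    | nil => simp
    | cons c cs => simp
  have hbwd0 : pvSweepR h_ false 0 hs.reverse = ((pvComps h_ hs.reverse).map (pvBscan h_ false)).flatten := by
    rw [pvSweepR_comps]
    cases hcomp : pvComps h_ hs.reverse with
    | nil => simp
    | cons c cs => simp
  have hbwd : (pvSweepR h_ false 0 hs.reverse).reverse = ((pvComps h_ hs).map (pvRevBscan h_)).flatten := by
    rw [hbwd0, pvComps_reverse]
    rw [List.reverse_flatten]
    simp only [List.map_map, List.map_reverse, List.reverse_reverse]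
    rfl
  show pvZall (pvSweepR h_ false 0 hs) (pvSweepR h_ false 0 hs.reverse).reverse = _
  rw [hfwd, hbwd]
  exact pvZall_flatten h_ (pvComps h_ hs) (pvComps_mem_ne_nil h_ hs)

-- ---------- A side ----------
-- reference function: process the list with `prev` the previous platform and `m` the
-- running minimum of the current component
def pvRef (h_ : Int) : Int → Int → List Int → Bool
  | m, _, [] => decide (m ≤ h_)
  | m, prev, y :: ys =>
    if |y - prev| ≤ h_ then pvRef h_ (min m y) y ys
    else decide (m ≤ h_) && pvRef h_ y y ys

theorem pvOuterA_eq_ref (h_ : Int) : ∀ (xs : List Int) (cur m : Int),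
    (let p := pvInnerA h_ cur m xs;
     if p.1 > h_ then false
     else match hp : p.2 with
       | [] => true
       | z :: zs => pvOuterA h_ z zs) = pvRef h_ m cur xs := by
  intro xs
  induction xs with
  | nil =>
    intro cur m
    simp only [pvInnerA, pvRef]
    by_cases hm : m > h_ <;> simp [hm] <;> omega
  | cons y ys ih =>
    intro cur m
    by_cases hcut : |y - cur| ≤ h_
    · have h1 : pvInnerA h_ cur m (y :: ys) = pvInnerA h_ y (min m y) ys := by
        have hmin : (if y < m then y else m) = min m y := by omega
        simp [pvInnerA, hcut, hmin]
      rw [show pvRef h_ m cur (y :: ys) = pvRef h_ (min m y) y ys by simp [pvRef, hcut]]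
      rw [h1]
      exact ih y (min m y)
    · have h2 : pvInnerA h_ cur m (y :: ys) = (m, y :: ys) := by
        simp [pvInnerA, hcut]
      rw [h2]
      have houter : pvOuterA h_ y ys = pvRef h_ y y ys := by
        rw [pvOuterA]; exact ih y y
      simp only [pvRef, hcut, if_neg, ite_false]
      by_cases hm : m > h_
      · simp [hm]
      · have hdm : (decide (m ≤ h_)) = true := by simp; omega
        simp [hm, hdm, houter]

-- pvRef against the component decomposition
theorem pvRef_comps (h_ : Int) : ∀ (xs : List Int) (m prev : Int),
    pvRef h_ m prev xs =
      match pvComps h_ (prev :: xs) with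
      | (_ :: c0) :: cs => (decide (m ≤ h_) || c0.any (fun y => decide (y ≤ h_))) && cs.all (fun c => c.any (fun y => decide (y ≤ h_)))
      | _ => true := by
  intro xs
  induction xs with
  | nil => intro m prev; simp [pvComps, pvRef]
  | cons y ys ih =>
    intro m prev
    obtain ⟨c, cs, hc⟩ := pvComps_shape h_ ys y
    by_cases hg : |y - prev| ≤ h_
    · have hcomps : pvComps h_ (prev :: y :: ys) = (prev :: y :: c) :: cs := by
        simp [pvComps, hc, hg]
      rw [hcomps]
      rw [show pvRef h_ m prev (y :: ys) = pvRef h_ (min m y) y ys by simp [pvRef, hg]]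
      rw [ih (min m y) y, hc]
      have hmin : decide (min m y ≤ h_) = (decide (m ≤ h_) || decide (y ≤ h_)) := by
        by_cases hm : m ≤ h_ <;> by_cases hy : y ≤ h_ <;> simp [hm, hy] <;> omega
      simp [hmin, Bool.or_assoc]
    · have hcomps : pvComps h_ (prev :: y :: ys) = [prev] :: (y :: c) :: cs := by
        simp [pvComps, hc, hg]
      rw [hcomps]
      rw [show pvRef h_ m prev (y :: ys) = (decide (m ≤ h_) && pvRef h_ y y ys) by simp [pvRef, hg]]
      rw [ih y y, hc]
      simp [Bool.and_assoc]

-- A's whole answer = every component has some element ≤ h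
theorem pvA_comps (h_ : Int) (hs : List Int) :
    can_with_h hs h_ = (pvComps h_ hs).all (fun c => c.any (fun y => decide (y ≤ h_))) := by
  cases hs with
  | nil => rfl
  | cons x rest =>
    have hA : can_with_h (x :: rest) h_ = pvRef h_ x x rest := by
      show pvOuterA h_ x rest = _
      rw [pvOuterA]
      exact pvOuterA_eq_ref h_ rest x x
    rw [hA, pvRef_comps]
    obtain ⟨c, cs, hc⟩ := pvComps_shape h_ rest x
    rw [hc]
    simp

-- ===== VERDICT (by name: the statement is the Claim_ definition above) =====
theorem can_with_h_spec : Claim_equal_can_with_h := by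
  intro heights h_ _
  unfold Spec_can_with_h
  rw [pvA_comps, pvAlt_comps]
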